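-- pv_equiv track=rewrite | github.com/maryfm4/cryptography | Shuffle_script.py | define_size
-- ===== SOURCE A (Python) =====
-- def define_size(text):
--     numbers = [1, 2, 3, 4, 5, 6, 7, 8, 9, 10, 11, 12, 13, 14, 15, 16, 17, 18, 19, 20, 21, 22, 23, 24, 25, 26, 27, 28,
--                29, 30]
--     for item in numbers:
--         if len(text) <= item ** 2:
--             if item % 2 == 0:
--                 return item + 1
--             else:
--                 return item
--     else:
--         return "Your text is too long"
-- ===== SOURCE B (Python) =====
-- def define_size(text):
--     # Closed form: n = ceil(sqrt(len(text))) via integer Newton iteration,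
--     # bumped to the next odd number; same too-long message beyond 900.
--     L = len(text)
--     if L > 900:
--         return "Your text is too long"
--     if L <= 1:
--         return 1
--     x = L
--     y = (x + 1) // 2
--     while y < x:
--         x = y
--         y = (x + L // x) // 2
--     n = x if x * x >= L else x + 1
--     return n + 1 if n % 2 == 0 else n
-- ===== Notes on version B (the rewrite author's own statement) =====
-- stated objective: alternative
-- what changed: Replaces the linear scan over the fixed list [1..30] with a direct computation of ceil(sqrt(len(text))) by integer Newton iteration, then bumps even results to the next odd number.
import Mathlib
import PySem

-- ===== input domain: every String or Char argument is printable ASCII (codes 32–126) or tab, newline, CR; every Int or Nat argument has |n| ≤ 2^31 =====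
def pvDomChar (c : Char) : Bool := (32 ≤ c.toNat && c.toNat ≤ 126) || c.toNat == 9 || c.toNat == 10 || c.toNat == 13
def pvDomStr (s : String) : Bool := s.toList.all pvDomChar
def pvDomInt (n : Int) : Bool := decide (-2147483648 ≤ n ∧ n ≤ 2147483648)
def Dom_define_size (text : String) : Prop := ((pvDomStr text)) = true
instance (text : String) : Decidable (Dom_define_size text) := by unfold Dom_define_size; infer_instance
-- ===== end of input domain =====

-- B replaces A's scan of the fixed list [1..30] by a direct integer-Newton ceil-sqrt; equal on Pre_ (len ≤ 900).

-- ===== PORT A =====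
-- the fixed list A scans
def dsNumbers : List Int :=
  [1, 2, 3, 4, 5, 6, 7, 8, 9, 10, 11, 12, 13, 14, 15, 16, 17, 18, 19, 20,
   21, 22, 23, 24, 25, 26, 27, 28, 29, 30]

-- the for-loop of A: first item with len(text) <= item**2
def dsLoop (L : Int) : List Int → Int
  | [] => 0  -- Python returns the too-long message string here: excluded by Pre_
  | item :: rest =>
    if L ≤ item ^ 2 then
      (if PySem.Int.mod item 2 = 0 then item + 1 else item)
    else dsLoop L rest

def define_size (text : String) : Int :=
  dsLoop (PySem.Str.len text) dsNumbers

-- ===== PORT B =====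
-- the while-loop of B: integer Newton iteration (fuel bounds the loop; it is never exhausted for L ≤ 900)
def dsNewton (L : Int) : Nat → Int → Int → Int
  | 0, x, _ => x
  | fuel + 1, x, y =>
    if y < x then dsNewton L fuel y (PySem.Int.floordiv (y + PySem.Int.floordiv L y) 2)
    else x

def dsAltCore (L : Int) : Int :=
  if L > 900 then 0  -- Python returns the too-long message string here: excluded by Pre_
  else if L ≤ 1 then 1
  else
    let x := dsNewton L 1000 L (PySem.Int.floordiv (L + 1) 2)
    let n := if x * x ≥ L then x else x + 1
    if PySem.Int.mod n 2 = 0 then n + 1 else n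

def define_size_alt (text : String) : Int :=
  dsAltCore (PySem.Str.len text)

-- ===== PRECONDITION & SPEC =====
-- Pre_ excludes texts longer than 900 characters, on which A returns
-- the too-long message string (not an Int) instead of a value of the declared Int type.
def Pre_define_size (text : String) : Prop := PySem.Str.len text ≤ 900
instance (text : String) : Decidable (Pre_define_size text) := by unfold Pre_define_size; infer_instance
def pvWitness_define_size : String := "hello world"

def Spec_define_size (text : String) (out : Int) : Prop := out = define_size_alt text
instance (text : String) (out : Int) : Decidable (Spec_define_size text out) := by unfold Spec_define_size; infer_instance

-- ===== CLAIM (what is proved, stated in full; the proofs are below) =====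
def Claim_equal_define_size : Prop := ∀ (text : String), Dom_define_size text → Pre_define_size text → Spec_define_size text (define_size text)

-- ===== LEMMAS AND PROOFS =====
set_option maxRecDepth 10000 in
lemma ds_key : ∀ n : Nat, n < 901 → dsLoop (n : Int) dsNumbers = dsAltCore (n : Int) := by
  decide

-- ===== VERDICT (by name: the statement is the Claim_ definition above) =====
theorem define_size_spec : Claim_equal_define_size := by
  intro text _ hpre
  unfold Spec_define_size define_size define_size_alt
  unfold Pre_define_size at hpre
  rw [PySem.Str.len_eq] at hpre ⊢
  exact ds_key text.toList.length (by exact_mod_cast Int.lt_add_one_of_le hpre)
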